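-- pv_equiv track=rewrite | github.com/sshreya99/Interview-OA | Prep/amazon_SDE1_redshift/OA Prep/OA6.py | max_score_with_one_change
-- ===== SOURCE A (Python) =====
-- def max_score_with_one_change(data: str) -> int:
--     def compute_score(s):
--         score = len(s)  # 1 point per character
--         for i in range(len(s) - 1):
--             if abs(ord(s[i]) - ord(s[i+1])) <= 1:
--                 score += 1
--         return score
--
--     max_score = compute_score(data)
--
--     for i in range(len(data)):
--         original_char = data[i]
--         for c in 'abcdefghijklmnopqrstuvwxyz':
--             if c == original_char:
--                 continue
--             new_data = data[:i] + c + data[i+1:]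
--             score = compute_score(new_data)
--             max_score = max(max_score, score)
--
--     return max_score
-- ===== SOURCE B (Python) =====
-- def max_score_with_one_change(data: str) -> int:
--     n = len(data)
--     pair = [1 if abs(ord(data[i]) - ord(data[i + 1])) <= 1 else 0 for i in range(n - 1)]
--     base = n + sum(pair)
--     best = base
--     for i in range(n):
--         lost = (pair[i - 1] if i > 0 else 0) + (pair[i] if i < n - 1 else 0)
--         for c in 'abcdefghijklmnopqrstuvwxyz':
--             if c == data[i]:
--                 continue
--             gained = 0
--             if i > 0 and abs(ord(data[i - 1]) - ord(c)) <= 1: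
--                 gained += 1
--             if i < n - 1 and abs(ord(c) - ord(data[i + 1])) <= 1:
--                 gained += 1
--             best = max(best, base - lost + gained)
--     return best
-- ===== Notes on version B (the rewrite author's own statement) =====
-- stated objective: faster
-- what changed: B precomputes the adjacent-pair score once and evaluates each of the 26n candidate single-character changes by an O(1) local delta on the at most two affected neighbour pairs, instead of rebuilding the string and rescoring it in O(n) per candidate.
import Mathlib
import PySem

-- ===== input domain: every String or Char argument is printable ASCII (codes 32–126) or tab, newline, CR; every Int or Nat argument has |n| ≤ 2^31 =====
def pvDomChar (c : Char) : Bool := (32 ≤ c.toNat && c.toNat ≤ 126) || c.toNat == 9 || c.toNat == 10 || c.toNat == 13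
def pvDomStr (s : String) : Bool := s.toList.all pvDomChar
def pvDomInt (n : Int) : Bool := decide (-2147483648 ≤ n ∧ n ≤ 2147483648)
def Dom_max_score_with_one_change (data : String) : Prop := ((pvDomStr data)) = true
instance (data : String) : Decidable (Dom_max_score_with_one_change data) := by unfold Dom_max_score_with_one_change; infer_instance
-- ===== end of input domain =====

-- B recomputes only the O(1) local pair delta per candidate change instead of rescoring the whole
-- string for each of the 26·n candidates (asymptotically faster; exact same result).

-- helpers shared by both ports: abs(ord(x) - ord(y)) <= 1, and the lowercase alphabet literal
def pvClose (x y : Char) : Bool := decide (|(x.toNat : Int) - (y.toNat : Int)| ≤ 1)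

def pvLetters : List Char := "abcdefghijklmnopqrstuvwxyz".toList

-- ===== PORT A =====
-- compute_score: len(s) plus 1 for each adjacent pair within distance 1 (indices always in range,
-- so s[i] is getD; Python slices with in-range nonneg bounds are take/drop)
def pvComputeScore (s : List Char) : Int :=
  (List.range (s.length - 1)).foldl
    (fun score i => if pvClose (s.getD i ' ') (s.getD (i + 1) ' ') then score + 1 else score)
    (s.length : Int)

def max_score_with_one_change (data : String) : Int :=
  let l := data.toList
  (List.range l.length).foldl
    (fun ms i =>
      let original := l.getD i ' '
      pvLetters.foldl
        (fun ms c =>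
          if c == original then ms
          else max ms (pvComputeScore (l.take i ++ c :: l.drop (i + 1))))
        ms)
    (pvComputeScore l)

-- ===== PORT B =====
def max_score_with_one_change_alt (data : String) : Int :=
  let l := data.toList
  let n := l.length
  let pair := (List.range (n - 1)).map
    (fun i => if pvClose (l.getD i ' ') (l.getD (i + 1) ' ') then (1 : Int) else 0)
  let base := (n : Int) + pair.sum
  (List.range n).foldl
    (fun best i =>
      let lost := (if 0 < i then pair.getD (i - 1) 0 else 0) +
                  (if i < n - 1 then pair.getD i 0 else 0)
      pvLetters.foldl
        (fun best c =>
          if c == l.getD i ' ' then best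
          else
            let gained := (if 0 < i then (if pvClose (l.getD (i - 1) ' ') c then (1 : Int) else 0) else 0) +
                          (if i < n - 1 then (if pvClose c (l.getD (i + 1) ' ') then (1 : Int) else 0) else 0)
            max best (base - lost + gained))
        best)
    base

-- ===== PRECONDITION & SPEC =====
def Spec_max_score_with_one_change (data : String) (out : Int) : Prop := out = max_score_with_one_change_alt data
instance (data : String) (out : Int) : Decidable (Spec_max_score_with_one_change data out) := by unfold Spec_max_score_with_one_change; infer_instance

-- ===== CLAIM (what is proved, stated in full; the proofs are below) =====
def Claim_equal_max_score_with_one_change : Prop := ∀ (data : String), Dom_max_score_with_one_change data → Spec_max_score_with_one_change data (max_score_with_one_change data)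

-- ===== LEMMAS AND PROOFS =====

-- recursive pair score: 1 per adjacent pair within distance 1
def pvPS : List Char → Int
  | [] => 0
  | [_] => 0
  | a :: b :: t => (if pvClose a b then 1 else 0) + pvPS (b :: t)

-- the two pair contributions at position i that a change there removes / adds
def pvLost (l : List Char) (i : Nat) : Int :=
  (if 0 < i then (if pvClose (l.getD (i - 1) ' ') (l.getD i ' ') then (1 : Int) else 0) else 0) +
  (if i + 1 < l.length then (if pvClose (l.getD i ' ') (l.getD (i + 1) ' ') then (1 : Int) else 0) else 0)

def pvGain (l : List Char) (i : Nat) (c : Char) : Int :=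
  (if 0 < i then (if pvClose (l.getD (i - 1) ' ') c then (1 : Int) else 0) else 0) +
  (if i + 1 < l.length then (if pvClose c (l.getD (i + 1) ' ') then (1 : Int) else 0) else 0)

lemma pvPS_sum (s : List Char) :
    ((List.range (s.length - 1)).map
      (fun i => if pvClose (s.getD i ' ') (s.getD (i + 1) ' ') then (1 : Int) else 0)).sum = pvPS s := by
  induction s with
  | nil => simp [pvPS]
  | cons a t ih =>
    cases t with
    | nil => simp [pvPS]
    | cons b u =>
      have hlen : (a :: b :: u).length - 1 = (b :: u).length - 1 + 1 := by simp
      rw [hlen, List.range_succ_eq_map, List.map_cons, List.map_map, List.sum_cons]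
      have hshift : (List.map
          ((fun i => if pvClose ((a :: b :: u).getD i ' ') ((a :: b :: u).getD (i + 1) ' ') then (1 : Int) else 0) ∘ Nat.succ)
          (List.range ((b :: u).length - 1)))
          = List.map (fun i => if pvClose ((b :: u).getD i ' ') ((b :: u).getD (i + 1) ' ') then (1 : Int) else 0)
            (List.range ((b :: u).length - 1)) := by
        apply List.map_congr_left
        intro i _
        simp [Function.comp]
      rw [hshift, ih]
      simp [pvPS]

lemma pvPS_countP (s : List Char) :
    ((List.range (s.length - 1)).countP
      (fun i => pvClose (s.getD i ' ') (s.getD (i + 1) ' ')) : Int) = pvPS s := by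
  rw [← PySem.List.sum_map_ite_one_zero, pvPS_sum]

lemma pvComputeScore_eq (s : List Char) : pvComputeScore s = (s.length : Int) + pvPS s := by
  unfold pvComputeScore
  rw [PySem.List.foldl_count_if, pvPS_countP]

lemma pvLost_cons (a : Char) (t : List Char) (j : Nat) (hj : 0 < j) :
    pvLost (a :: t) (j + 1) = pvLost t j := by
  obtain ⟨k, rfl⟩ := Nat.exists_eq_add_of_lt hj
  simp [pvLost]

lemma pvGain_cons (a : Char) (t : List Char) (j : Nat) (c : Char) (hj : 0 < j) :
    pvGain (a :: t) (j + 1) c = pvGain t j c := by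
  obtain ⟨k, rfl⟩ := Nat.exists_eq_add_of_lt hj
  simp [pvGain]

lemma pvPS_replace (l : List Char) (i : Nat) (c : Char) (h : i < l.length) :
    pvPS (l.take i ++ c :: l.drop (i + 1)) = pvPS l - pvLost l i + pvGain l i c := by
  induction l generalizing i c with
  | nil => simp at h
  | cons a t ih =>
    cases i with
    | zero =>
      cases t with
      | nil => simp [pvPS, pvLost, pvGain]
      | cons b u => simp [pvPS, pvLost, pvGain]; ring
    | succ j =>
      have hj : j < t.length := by simpa using h
      cases t with
      | nil => simp at hj
      | cons b u =>
        cases j with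
        | zero =>
          cases u with
          | nil => simp [pvPS, pvLost, pvGain]
          | cons v w => simp [pvPS, pvLost, pvGain]; ring
        | succ k =>
          have hk : k + 1 < (b :: u).length := hj
          have ihk := ih (k + 1) c hk
          have htake : (a :: b :: u).take (k + 1 + 1) ++ c :: (a :: b :: u).drop (k + 1 + 1 + 1)
              = a :: ((b :: u).take (k + 1) ++ c :: (b :: u).drop (k + 1 + 1)) := by
            simp
          rw [htake, pvLost_cons a (b :: u) (k + 1) (by omega), pvGain_cons a (b :: u) (k + 1) c (by omega)]
          have hhead : ((b :: u).take (k + 1) ++ c :: (b :: u).drop (k + 1 + 1)) = b :: (u.take k ++ c :: u.drop (k + 1)) := by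
            simp
          rw [hhead]
          show (if pvClose a b then (1 : Int) else 0) + pvPS (b :: (u.take k ++ c :: u.drop (k + 1)))
              = (if pvClose a b then (1 : Int) else 0) + pvPS (b :: u) - pvLost (b :: u) (k + 1) + pvGain (b :: u) (k + 1) c
          rw [← hhead, ihk]
          ring

lemma pvReplace_length (l : List Char) (i : Nat) (c : Char) (h : i < l.length) :
    (l.take i ++ c :: l.drop (i + 1)).length = l.length := by
  simp; omega

-- B's local delta (via the precomputed pair list) matches pvLost
lemma pair_getD (l : List Char) (j : Nat) (hj : j + 1 < l.length) :
    ((List.range (l.length - 1)).map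
      (fun i => if pvClose (l.getD i ' ') (l.getD (i + 1) ' ') then (1 : Int) else 0)).getD j 0
    = (if pvClose (l.getD j ' ') (l.getD (j + 1) ' ') then (1 : Int) else 0) := by
  exact PySem.List.getD_map_range _ _ _ _ (by omega)

-- ===== VERDICT (by name: the statement is the Claim_ definition above) =====
theorem max_score_with_one_change_spec : Claim_equal_max_score_with_one_change := by
  intro data _
  unfold Spec_max_score_with_one_change max_score_with_one_change max_score_with_one_change_alt
  dsimp only
  set l := data.toList with hl
  set n := l.length with hn
  set pair := (List.range (n - 1)).map
    (fun i => if pvClose (l.getD i ' ') (l.getD (i + 1) ' ') then (1 : Int) else 0) with hpair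
  have hsum : pvPS l = pair.sum := by rw [hpair, hn, pvPS_sum]
  have hbase : pvComputeScore l = (n : Int) + pair.sum := by
    rw [pvComputeScore_eq, ← hsum, hn]
  rw [hbase]
  apply PySem.List.foldl_congr_mem
  intro acc i hi
  have hin : i < n := by rw [hn]; simpa using hi
  apply PySem.List.foldl_congr_mem
  intro acc2 ch _
  by_cases hc : (ch == l.getD i ' ') = true
  · rw [if_pos hc, if_pos hc]
  · rw [if_neg hc, if_neg hc]
    congr 1
    rw [pvComputeScore_eq, pvReplace_length l i ch hin, pvPS_replace l i ch hin, ← hn]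
    have hlost : pvLost l i = (if 0 < i then pair.getD (i - 1) 0 else 0) +
        (if i < n - 1 then pair.getD i 0 else 0) := by
      unfold pvLost
      congr 1
      · by_cases h0 : 0 < i
        · rw [if_pos h0, if_pos h0, hpair, pair_getD l (i - 1) (by omega)]
          have e : i - 1 + 1 = i := by omega
          rw [e]
        · rw [if_neg h0, if_neg h0]
      · by_cases h1 : i + 1 < l.length
        · rw [if_pos h1, if_pos (by omega : i < n - 1), hpair, pair_getD l i h1]
        · rw [if_neg h1, if_neg (by omega : ¬ i < n - 1)]
    have hgain : pvGain l i ch =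
        (if 0 < i then (if pvClose (l.getD (i - 1) ' ') ch then (1 : Int) else 0) else 0) +
        (if i < n - 1 then (if pvClose ch (l.getD (i + 1) ' ') then (1 : Int) else 0) else 0) := by
      unfold pvGain
      congr 1
      by_cases h1 : i + 1 < l.length
      · rw [if_pos h1, if_pos (by omega : i < n - 1)]
      · rw [if_neg h1, if_neg (by omega : ¬ i < n - 1)]
    rw [hsum, hlost, hgain]
    ring
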